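-- pv_equiv track=rewrite | github.com/sueszli/vector-database-benchmark | dataset/python-mutated/optionaltags.py | is_optional_end
-- ===== SOURCE A (Python) =====
-- def is_optional_end(tagname, next):
--     if False:
--         while True:
--             i = 10
--     type = next and next['type'] or None
--     if tagname in ('html', 'head', 'body'):
--         return type not in ('Comment', 'SpaceCharacters')
--     elif tagname in ('li', 'optgroup', 'tr'):
--         if type == 'StartTag':
--             return next['name'] == tagname
--         else:
--             return type == 'EndTag' or type is None
--     elif tagname in ('dt', 'dd'):
--         if type == 'StartTag':
--             return next['name'] in ('dt', 'dd')
--         elif tagname == 'dd':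
--             return type == 'EndTag' or type is None
--         else:
--             return False
--     elif tagname == 'p':
--         if type in ('StartTag', 'EmptyTag'):
--             return next['name'] in ('address', 'article', 'aside', 'blockquote', 'datagrid', 'dialog', 'dir', 'div', 'dl', 'fieldset', 'footer', 'form', 'h1', 'h2', 'h3', 'h4', 'h5', 'h6', 'header', 'hr', 'menu', 'nav', 'ol', 'p', 'pre', 'section', 'table', 'ul')
--         else:
--             return type == 'EndTag' or type is None
--     elif tagname == 'option':
--         if type == 'StartTag':
--             return next['name'] in ('option', 'optgroup')
--         else:
--             return type == 'EndTag' or type is None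
--     elif tagname in ('rt', 'rp'):
--         if type == 'StartTag':
--             return next['name'] in ('rt', 'rp')
--         else:
--             return type == 'EndTag' or type is None
--     elif tagname == 'colgroup':
--         if type in ('Comment', 'SpaceCharacters'):
--             return False
--         elif type == 'StartTag':
--             return next['name'] != 'colgroup'
--         else:
--             return True
--     elif tagname in ('thead', 'tbody'):
--         if type == 'StartTag':
--             return next['name'] in ['tbody', 'tfoot']
--         elif tagname == 'tbody':
--             return type == 'EndTag' or type is None
--         else:
--             return False
--     elif tagname == 'tfoot':
--         if type == 'StartTag':
--             return next['name'] == 'tbody'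
--         else:
--             return type == 'EndTag' or type is None
--     elif tagname in ('td', 'th'):
--         if type == 'StartTag':
--             return next['name'] in ('td', 'th')
--         else:
--             return type == 'EndTag' or type is None
--     return False
-- ===== SOURCE B (Python) =====
-- # Type-first rewrite: instead of A's per-tag if/elif chain, B dispatches on the
-- # kind of the NEXT token first and decides by tagname-set membership inside each case.
--
-- # end tag omissible before an EndTag / end of stream
-- _OMIT_BEFORE_END = frozenset((
--     'html', 'head', 'body', 'li', 'optgroup', 'tr', 'dd', 'p', 'option',
--     'rt', 'rp', 'colgroup', 'tbody', 'tfoot', 'td', 'th'))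
--
-- _P_FOLLOWERS = (
--     'address', 'article', 'aside', 'blockquote', 'datagrid', 'dialog', 'dir',
--     'div', 'dl', 'fieldset', 'footer', 'form', 'h1', 'h2', 'h3', 'h4', 'h5',
--     'h6', 'header', 'hr', 'menu', 'nav', 'ol', 'p', 'pre', 'section', 'table',
--     'ul')
--
-- # start tags that permit omitting the end tag (per tag)
-- _START_FOLLOWERS = {
--     'li': ('li',), 'optgroup': ('optgroup',), 'tr': ('tr',),
--     'dt': ('dt', 'dd'), 'dd': ('dt', 'dd'),
--     'p': _P_FOLLOWERS,
--     'option': ('option', 'optgroup'),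
--     'rt': ('rt', 'rp'), 'rp': ('rt', 'rp'),
--     'thead': ('tbody', 'tfoot'), 'tbody': ('tbody', 'tfoot'),
--     'tfoot': ('tbody',),
--     'td': ('td', 'th'), 'th': ('td', 'th'),
-- }
--
-- def is_optional_end(tagname, next):
--     type = next and next['type'] or None
--     if type is None or type == 'EndTag':
--         return tagname in _OMIT_BEFORE_END
--     if type == 'StartTag':
--         if tagname in ('html', 'head', 'body'):
--             return True
--         if tagname == 'colgroup':
--             return next['name'] != 'colgroup'
--         follows = _START_FOLLOWERS.get(tagname)
--         return follows is not None and next['name'] in follows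
--     if type in ('Comment', 'SpaceCharacters'):
--         return False
--     # EmptyTag or any other token kind
--     if tagname in ('html', 'head', 'body', 'colgroup'):
--         return True
--     if tagname == 'p' and type == 'EmptyTag':
--         return next['name'] in _P_FOLLOWERS
--     return False
-- ===== Notes on version B (the rewrite author's own statement) =====
-- stated objective: alternative
-- what changed: B inverts the control structure: instead of A's per-tag if/elif chain that re-tests the token type inside every branch, B dispatches on the next token's type first (None/EndTag, StartTag, Comment/SpaceCharacters, EmptyTag/other) and decides by tagname-set membership inside each type case, with one follow-set map consulted only in the StartTag case.
import Mathlib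
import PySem

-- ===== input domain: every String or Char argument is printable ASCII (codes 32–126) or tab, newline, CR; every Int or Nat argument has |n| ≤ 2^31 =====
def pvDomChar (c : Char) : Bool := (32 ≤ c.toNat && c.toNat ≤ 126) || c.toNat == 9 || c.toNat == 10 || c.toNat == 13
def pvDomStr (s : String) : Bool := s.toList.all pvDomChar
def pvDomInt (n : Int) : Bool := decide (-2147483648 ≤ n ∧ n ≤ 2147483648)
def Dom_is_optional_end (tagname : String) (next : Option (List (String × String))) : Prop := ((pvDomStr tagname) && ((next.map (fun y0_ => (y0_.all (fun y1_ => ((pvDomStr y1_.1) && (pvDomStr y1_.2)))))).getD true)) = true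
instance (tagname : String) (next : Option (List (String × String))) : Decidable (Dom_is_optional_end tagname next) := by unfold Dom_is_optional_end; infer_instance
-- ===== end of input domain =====

-- B inverts A's control structure: it dispatches on the NEXT token's type first
-- (EndTag/None, StartTag, Comment/SpaceCharacters, EmptyTag/other) and decides by
-- tagname-set membership inside each case; objective: alternative decomposition.

-- shared helper: the Python line `type = next and next['type'] or None`, common to A and B.
-- (a truthy dict without key 'type' is a KeyError in Python: excluded by Pre_; `none` here)
def pyNextType (next : Option (List (String × String))) : Option String :=
  match next with
  | some d =>
      if d.isEmpty then none
      else match List.lookup "type" d with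
           | some s => if s == "" then none else some s   -- falsy '' collapses to None
           | none => none
  | none => none

-- shared helper: `next['name']`, read only where `type` guarantees next is a dict;
-- a missing 'name' key is a KeyError in Python: excluded by Pre_; "" here.
def pyNextName (next : Option (List (String × String))) : String :=
  match next with
  | some d => (List.lookup "name" d).getD ""
  | none => ""

-- ===== PORT A =====
def is_optional_end (tagname : String) (next : Option (List (String × String))) : Bool :=
  let type := pyNextType next
  if tagname == "html" || tagname == "head" || tagname == "body" then
    !(type == some "Comment" || type == some "SpaceCharacters")
  else if tagname == "li" || tagname == "optgroup" || tagname == "tr" then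
    if type == some "StartTag" then pyNextName next == tagname
    else type == some "EndTag" || type == none
  else if tagname == "dt" || tagname == "dd" then
    if type == some "StartTag" then ["dt", "dd"].contains (pyNextName next)
    else if tagname == "dd" then type == some "EndTag" || type == none
    else false
  else if tagname == "p" then
    if type == some "StartTag" || type == some "EmptyTag" then
      ["address", "article", "aside", "blockquote", "datagrid", "dialog", "dir",
       "div", "dl", "fieldset", "footer", "form", "h1", "h2", "h3", "h4", "h5",
       "h6", "header", "hr", "menu", "nav", "ol", "p", "pre", "section", "table",
       "ul"].contains (pyNextName next)
    else type == some "EndTag" || type == none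
  else if tagname == "option" then
    if type == some "StartTag" then ["option", "optgroup"].contains (pyNextName next)
    else type == some "EndTag" || type == none
  else if tagname == "rt" || tagname == "rp" then
    if type == some "StartTag" then ["rt", "rp"].contains (pyNextName next)
    else type == some "EndTag" || type == none
  else if tagname == "colgroup" then
    if type == some "Comment" || type == some "SpaceCharacters" then false
    else if type == some "StartTag" then pyNextName next != "colgroup"
    else true
  else if tagname == "thead" || tagname == "tbody" then
    if type == some "StartTag" then ["tbody", "tfoot"].contains (pyNextName next)
    else if tagname == "tbody" then type == some "EndTag" || type == none
    else false
  else if tagname == "tfoot" then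
    if type == some "StartTag" then pyNextName next == "tbody"
    else type == some "EndTag" || type == none
  else if tagname == "td" || tagname == "th" then
    if type == some "StartTag" then ["td", "th"].contains (pyNextName next)
    else type == some "EndTag" || type == none
  else false

-- ===== PORT B =====
-- _OMIT_BEFORE_END: end tag omissible before an EndTag / end of stream
def omitBeforeEnd : List String :=
  ["html", "head", "body", "li", "optgroup", "tr", "dd", "p", "option",
   "rt", "rp", "colgroup", "tbody", "tfoot", "td", "th"]

-- _P_FOLLOWERS
def pFollowers : List String :=
  ["address", "article", "aside", "blockquote", "datagrid", "dialog", "dir",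
   "div", "dl", "fieldset", "footer", "form", "h1", "h2", "h3", "h4", "h5",
   "h6", "header", "hr", "menu", "nav", "ol", "p", "pre", "section", "table",
   "ul"]

-- _START_FOLLOWERS: start tags that permit omitting the end tag (per tag)
def startFollowers : List (String × List String) :=
  [("li", ["li"]), ("optgroup", ["optgroup"]), ("tr", ["tr"]),
   ("dt", ["dt", "dd"]), ("dd", ["dt", "dd"]),
   ("p", pFollowers),
   ("option", ["option", "optgroup"]),
   ("rt", ["rt", "rp"]), ("rp", ["rt", "rp"]),
   ("thead", ["tbody", "tfoot"]), ("tbody", ["tbody", "tfoot"]),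
   ("tfoot", ["tbody"]),
   ("td", ["td", "th"]), ("th", ["td", "th"])]

def is_optional_end_alt (tagname : String) (next : Option (List (String × String))) : Bool :=
  let type := pyNextType next
  if type == none || type == some "EndTag" then
    omitBeforeEnd.contains tagname
  else if type == some "StartTag" then
    if tagname == "html" || tagname == "head" || tagname == "body" then true
    else if tagname == "colgroup" then pyNextName next != "colgroup"
    else match List.lookup tagname startFollowers with
         | some follows => follows.contains (pyNextName next)
         | none => false
  else if type == some "Comment" || type == some "SpaceCharacters" then false
  else if ["html", "head", "body", "colgroup"].contains tagname then true
  else if tagname == "p" && type == some "EmptyTag" then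
    pFollowers.contains (pyNextName next)
  else false

-- ===== PRECONDITION & SPEC =====
-- Pre_ excludes exactly the inputs where Python A raises KeyError: a truthy `next`
-- dict without the 'type' key, or one whose 'name' key is read (tagname/type reach a
-- branch that reads next['name']) but missing. A returns no value there.
def preCheck (tagname : String) (next : Option (List (String × String))) : Bool :=
  match next with
  | none => true
  | some d =>
      d.isEmpty ||
      ((List.lookup "type" d).isSome &&
       (!((["li", "optgroup", "tr", "dt", "dd", "option", "rt", "rp", "colgroup",
            "thead", "tbody", "tfoot", "td", "th"].contains tagname &&
           List.lookup "type" d == some "StartTag") ||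
          (tagname == "p" &&
           (List.lookup "type" d == some "StartTag" ||
            List.lookup "type" d == some "EmptyTag"))) ||
        (List.lookup "name" d).isSome))

def Pre_is_optional_end (tagname : String) (next : Option (List (String × String))) : Prop :=
  preCheck tagname next = true
instance (tagname : String) (next : Option (List (String × String))) : Decidable (Pre_is_optional_end tagname next) := by unfold Pre_is_optional_end; infer_instance

def pvWitness_is_optional_end : String × (Option (List (String × String))) :=
  ("li", some [("type", "StartTag"), ("name", "li")])

def Spec_is_optional_end (tagname : String) (next : Option (List (String × String))) (out : Bool) : Prop := out = is_optional_end_alt tagname next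
instance (tagname : String) (next : Option (List (String × String))) (out : Bool) : Decidable (Spec_is_optional_end tagname next out) := by unfold Spec_is_optional_end; infer_instance

-- ===== CLAIM (what is proved, stated in full; the proofs are below) =====
def Claim_equal_is_optional_end : Prop := ∀ (tagname : String) (next : Option (List (String × String))), Dom_is_optional_end tagname next → Pre_is_optional_end tagname next → Spec_is_optional_end tagname next (is_optional_end tagname next)

-- ===== LEMMAS AND PROOFS =====

-- the two ports agree on every input (both totalise the excluded KeyError inputs the same way)
theorem ports_agree (tagname : String) (next : Option (List (String × String))) :
    is_optional_end tagname next = is_optional_end_alt tagname next := by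
  unfold is_optional_end is_optional_end_alt
  generalize pyNextName next = n
  generalize pyNextType next = t
  by_cases h1 : tagname = "html"
  · rcases t with _ | s
    · simp [h1, beq_eq_decide, List.lookup, omitBeforeEnd, startFollowers, pFollowers]
    · by_cases e1 : s = "StartTag" <;> by_cases e2 : s = "EndTag" <;>
        by_cases e3 : s = "Comment" <;> by_cases e4 : s = "SpaceCharacters" <;>
        by_cases e5 : s = "EmptyTag" <;>
        simp_all [h1, beq_eq_decide, List.lookup, omitBeforeEnd, startFollowers, pFollowers]
  by_cases h2 : tagname = "head"
  · rcases t with _ | s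
    · simp [h2, beq_eq_decide, List.lookup, omitBeforeEnd, startFollowers, pFollowers]
    · by_cases e1 : s = "StartTag" <;> by_cases e2 : s = "EndTag" <;>
        by_cases e3 : s = "Comment" <;> by_cases e4 : s = "SpaceCharacters" <;>
        by_cases e5 : s = "EmptyTag" <;>
        simp_all [h2, beq_eq_decide, List.lookup, omitBeforeEnd, startFollowers, pFollowers]
  by_cases h3 : tagname = "body"
  · rcases t with _ | s
    · simp [h3, beq_eq_decide, List.lookup, omitBeforeEnd, startFollowers, pFollowers]
    · by_cases e1 : s = "StartTag" <;> by_cases e2 : s = "EndTag" <;>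
        by_cases e3 : s = "Comment" <;> by_cases e4 : s = "SpaceCharacters" <;>
        by_cases e5 : s = "EmptyTag" <;>
        simp_all [h3, beq_eq_decide, List.lookup, omitBeforeEnd, startFollowers, pFollowers]
  by_cases h4 : tagname = "li"
  · rcases t with _ | s
    · simp [h4, beq_eq_decide, List.lookup, omitBeforeEnd, startFollowers, pFollowers]
    · by_cases e1 : s = "StartTag" <;> by_cases e2 : s = "EndTag" <;>
        by_cases e3 : s = "Comment" <;> by_cases e4 : s = "SpaceCharacters" <;>
        by_cases e5 : s = "EmptyTag" <;>
        simp_all [h4, beq_eq_decide, List.lookup, omitBeforeEnd, startFollowers, pFollowers]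
  by_cases h5 : tagname = "optgroup"
  · rcases t with _ | s
    · simp [h5, beq_eq_decide, List.lookup, omitBeforeEnd, startFollowers, pFollowers]
    · by_cases e1 : s = "StartTag" <;> by_cases e2 : s = "EndTag" <;>
        by_cases e3 : s = "Comment" <;> by_cases e4 : s = "SpaceCharacters" <;>
        by_cases e5 : s = "EmptyTag" <;>
        simp_all [h5, beq_eq_decide, List.lookup, omitBeforeEnd, startFollowers, pFollowers]
  by_cases h6 : tagname = "tr"
  · rcases t with _ | s
    · simp [h6, beq_eq_decide, List.lookup, omitBeforeEnd, startFollowers, pFollowers]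
    · by_cases e1 : s = "StartTag" <;> by_cases e2 : s = "EndTag" <;>
        by_cases e3 : s = "Comment" <;> by_cases e4 : s = "SpaceCharacters" <;>
        by_cases e5 : s = "EmptyTag" <;>
        simp_all [h6, beq_eq_decide, List.lookup, omitBeforeEnd, startFollowers, pFollowers]
  by_cases h7 : tagname = "dt"
  · rcases t with _ | s
    · simp [h7, beq_eq_decide, List.lookup, omitBeforeEnd, startFollowers, pFollowers]
    · by_cases e1 : s = "StartTag" <;> by_cases e2 : s = "EndTag" <;>
        by_cases e3 : s = "Comment" <;> by_cases e4 : s = "SpaceCharacters" <;>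
        by_cases e5 : s = "EmptyTag" <;>
        simp_all [h7, beq_eq_decide, List.lookup, omitBeforeEnd, startFollowers, pFollowers]
  by_cases h8 : tagname = "dd"
  · rcases t with _ | s
    · simp [h8, beq_eq_decide, List.lookup, omitBeforeEnd, startFollowers, pFollowers]
    · by_cases e1 : s = "StartTag" <;> by_cases e2 : s = "EndTag" <;>
        by_cases e3 : s = "Comment" <;> by_cases e4 : s = "SpaceCharacters" <;>
        by_cases e5 : s = "EmptyTag" <;>
        simp_all [h8, beq_eq_decide, List.lookup, omitBeforeEnd, startFollowers, pFollowers]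
  by_cases h9 : tagname = "p"
  · rcases t with _ | s
    · simp [h9, beq_eq_decide, List.lookup, omitBeforeEnd, startFollowers, pFollowers]
    · by_cases e1 : s = "StartTag" <;> by_cases e2 : s = "EndTag" <;>
        by_cases e3 : s = "Comment" <;> by_cases e4 : s = "SpaceCharacters" <;>
        by_cases e5 : s = "EmptyTag" <;>
        simp_all [h9, beq_eq_decide, List.lookup, omitBeforeEnd, startFollowers, pFollowers]
  by_cases h10 : tagname = "option"
  · rcases t with _ | s
    · simp [h10, beq_eq_decide, List.lookup, omitBeforeEnd, startFollowers, pFollowers]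
    · by_cases e1 : s = "StartTag" <;> by_cases e2 : s = "EndTag" <;>
        by_cases e3 : s = "Comment" <;> by_cases e4 : s = "SpaceCharacters" <;>
        by_cases e5 : s = "EmptyTag" <;>
        simp_all [h10, beq_eq_decide, List.lookup, omitBeforeEnd, startFollowers, pFollowers]
  by_cases h11 : tagname = "rt"
  · rcases t with _ | s
    · simp [h11, beq_eq_decide, List.lookup, omitBeforeEnd, startFollowers, pFollowers]
    · by_cases e1 : s = "StartTag" <;> by_cases e2 : s = "EndTag" <;>
        by_cases e3 : s = "Comment" <;> by_cases e4 : s = "SpaceCharacters" <;>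
        by_cases e5 : s = "EmptyTag" <;>
        simp_all [h11, beq_eq_decide, List.lookup, omitBeforeEnd, startFollowers, pFollowers]
  by_cases h12 : tagname = "rp"
  · rcases t with _ | s
    · simp [h12, beq_eq_decide, List.lookup, omitBeforeEnd, startFollowers, pFollowers]
    · by_cases e1 : s = "StartTag" <;> by_cases e2 : s = "EndTag" <;>
        by_cases e3 : s = "Comment" <;> by_cases e4 : s = "SpaceCharacters" <;>
        by_cases e5 : s = "EmptyTag" <;>
        simp_all [h12, beq_eq_decide, List.lookup, omitBeforeEnd, startFollowers, pFollowers]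
  by_cases h13 : tagname = "colgroup"
  · rcases t with _ | s
    · simp [h13, beq_eq_decide, List.lookup, omitBeforeEnd, startFollowers, pFollowers]
    · by_cases e1 : s = "StartTag" <;> by_cases e2 : s = "EndTag" <;>
        by_cases e3 : s = "Comment" <;> by_cases e4 : s = "SpaceCharacters" <;>
        by_cases e5 : s = "EmptyTag" <;>
        simp_all [h13, beq_eq_decide, List.lookup, omitBeforeEnd, startFollowers, pFollowers]
  by_cases h14 : tagname = "thead"
  · rcases t with _ | s
    · simp [h14, beq_eq_decide, List.lookup, omitBeforeEnd, startFollowers, pFollowers]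
    · by_cases e1 : s = "StartTag" <;> by_cases e2 : s = "EndTag" <;>
        by_cases e3 : s = "Comment" <;> by_cases e4 : s = "SpaceCharacters" <;>
        by_cases e5 : s = "EmptyTag" <;>
        simp_all [h14, beq_eq_decide, List.lookup, omitBeforeEnd, startFollowers, pFollowers]
  by_cases h15 : tagname = "tbody"
  · rcases t with _ | s
    · simp [h15, beq_eq_decide, List.lookup, omitBeforeEnd, startFollowers, pFollowers]
    · by_cases e1 : s = "StartTag" <;> by_cases e2 : s = "EndTag" <;>
        by_cases e3 : s = "Comment" <;> by_cases e4 : s = "SpaceCharacters" <;>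
        by_cases e5 : s = "EmptyTag" <;>
        simp_all [h15, beq_eq_decide, List.lookup, omitBeforeEnd, startFollowers, pFollowers]
  by_cases h16 : tagname = "tfoot"
  · rcases t with _ | s
    · simp [h16, beq_eq_decide, List.lookup, omitBeforeEnd, startFollowers, pFollowers]
    · by_cases e1 : s = "StartTag" <;> by_cases e2 : s = "EndTag" <;>
        by_cases e3 : s = "Comment" <;> by_cases e4 : s = "SpaceCharacters" <;>
        by_cases e5 : s = "EmptyTag" <;>
        simp_all [h16, beq_eq_decide, List.lookup, omitBeforeEnd, startFollowers, pFollowers]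
  by_cases h17 : tagname = "td"
  · rcases t with _ | s
    · simp [h17, beq_eq_decide, List.lookup, omitBeforeEnd, startFollowers, pFollowers]
    · by_cases e1 : s = "StartTag" <;> by_cases e2 : s = "EndTag" <;>
        by_cases e3 : s = "Comment" <;> by_cases e4 : s = "SpaceCharacters" <;>
        by_cases e5 : s = "EmptyTag" <;>
        simp_all [h17, beq_eq_decide, List.lookup, omitBeforeEnd, startFollowers, pFollowers]
  by_cases h18 : tagname = "th"
  · rcases t with _ | s
    · simp [h18, beq_eq_decide, List.lookup, omitBeforeEnd, startFollowers, pFollowers]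
    · by_cases e1 : s = "StartTag" <;> by_cases e2 : s = "EndTag" <;>
        by_cases e3 : s = "Comment" <;> by_cases e4 : s = "SpaceCharacters" <;>
        by_cases e5 : s = "EmptyTag" <;>
        simp_all [h18, beq_eq_decide, List.lookup, omitBeforeEnd, startFollowers, pFollowers]
  rcases t with _ | s
  · simp [h1, h2, h3, h4, h5, h6, h7, h8, h9, h10, h11, h12, h13, h14, h15, h16, h17, h18, beq_eq_decide, List.lookup, omitBeforeEnd, startFollowers, pFollowers]
  · by_cases e1 : s = "StartTag" <;> by_cases e2 : s = "EndTag" <;>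
      by_cases e3 : s = "Comment" <;> by_cases e4 : s = "SpaceCharacters" <;>
      by_cases e5 : s = "EmptyTag" <;>
      simp_all [h1, h2, h3, h4, h5, h6, h7, h8, h9, h10, h11, h12, h13, h14, h15, h16, h17, h18, beq_eq_decide, List.lookup, omitBeforeEnd, startFollowers, pFollowers]

-- ===== VERDICT (by name: the statement is the Claim_ definition above) =====
theorem is_optional_end_spec : Claim_equal_is_optional_end := by
  intro tagname next _ _
  exact ports_agree tagname next
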